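-- pv_equiv track=rewrite | github.com/daw1882/Spatial-Revised-VAE | utils.py | compute_kernel_sizes
-- ===== SOURCE A (Python) =====
-- from math import floor
--
-- def compute_kernel_sizes(s, num_layers):
--     """
--     Compute the kernel sizes for all layers of the network.
--
--     Params
--     ------
--     s: The size of the neighbor window.
--     num_layers: Number of layers in the network.
--
--     Return
--     ------
--     A list of the kernel sizes for the network layers.
--     """
--     kernels = []
--     size = s
--     for i in range(num_layers-1):
--         k = floor(size / 2) + 1
--         size = size - (k - 1)
--         kernels.append(k)
--     # The last layer in the network sets the kernel to the previous layer's
--     # output size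
--     kernels.append(size)
--     return kernels
-- ===== SOURCE B (Python) =====
-- def compute_kernel_sizes(s, num_layers):
--     # Closed form: after i loop steps A's running size equals ceil(s / 2**i)
--     # = -((-s) >> i), so kernels[i] = ceil(s/2**i)//2 + 1, and the last entry
--     # is the final size ceil(s / 2**max(0, num_layers-1)).
--     n = max(num_layers - 1, 0)
--     return [(-((-s) >> i)) // 2 + 1 for i in range(n)] + [-((-s) >> n)]
-- ===== Notes on version B (the rewrite author's own statement) =====
-- stated objective: simpler
-- what changed: Replaces A's stateful loop carrying a running size with an index-wise closed form: kernels[i] = ceil(s/2**i)//2 + 1 via a comprehension, last element ceil(s/2**max(0,num_layers-1)).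
import Mathlib
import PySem

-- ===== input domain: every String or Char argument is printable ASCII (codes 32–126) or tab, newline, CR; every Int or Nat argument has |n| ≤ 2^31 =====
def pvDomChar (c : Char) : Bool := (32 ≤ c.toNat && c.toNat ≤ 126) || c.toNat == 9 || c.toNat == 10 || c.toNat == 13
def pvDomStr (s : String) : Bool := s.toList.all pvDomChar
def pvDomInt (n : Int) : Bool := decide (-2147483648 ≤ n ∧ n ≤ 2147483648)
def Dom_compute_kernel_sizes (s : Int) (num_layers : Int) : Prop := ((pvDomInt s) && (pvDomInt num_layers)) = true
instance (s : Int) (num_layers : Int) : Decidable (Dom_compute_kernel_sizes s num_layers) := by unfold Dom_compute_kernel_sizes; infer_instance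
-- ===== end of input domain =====

-- B replaces A's stateful recurrence with an index-wise closed form kernels[i] = ceil(s/2^i)//2 + 1 (objective: simpler).


-- ===== PORT A =====
def compute_kernel_sizes (s : Int) (num_layers : Int) : List Int :=
  let st := (PySem.List.pyRange 0 (num_layers - 1) 1).foldl
    (fun (acc : List Int × Int) _ =>
      let k := PySem.Int.floordiv acc.2 2 + 1
      (acc.1 ++ [k], acc.2 - (k - 1))) ([], s)
  st.1 ++ [st.2]

-- ===== PORT B =====
-- ceil(s / 2**i) computed as -((-s) >> i), as in Source B (Python's >> is Int's >>>)
def cksCeilHalf (s : Int) (i : Nat) : Int := -((-s) >>> i)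

def compute_kernel_sizes_alt (s : Int) (num_layers : Int) : List Int :=
  let n : Nat := (num_layers - 1).toNat  -- = max(num_layers - 1, 0)
  ((List.range n).map (fun i => PySem.Int.floordiv (cksCeilHalf s i) 2 + 1)) ++ [cksCeilHalf s n]

-- ===== PRECONDITION & SPEC =====
def Spec_compute_kernel_sizes (s : Int) (num_layers : Int) (out : List Int) : Prop := out = compute_kernel_sizes_alt s num_layers
instance (s : Int) (num_layers : Int) (out : List Int) : Decidable (Spec_compute_kernel_sizes s num_layers out) := by unfold Spec_compute_kernel_sizes; infer_instance

-- ===== CLAIM (what is proved, stated in full; the proofs are below) =====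
def Claim_equal_compute_kernel_sizes : Prop := ∀ (s : Int) (num_layers : Int), Dom_compute_kernel_sizes s num_layers → Spec_compute_kernel_sizes s num_layers (compute_kernel_sizes s num_layers)

-- ===== LEMMAS AND PROOFS =====

lemma cksCeilHalf_eq (s : Int) (i : Nat) : cksCeilHalf s i = -((-s) / (2:Int) ^ i) := by
  rw [cksCeilHalf, Int.shiftRight_eq_div_pow]; push_cast; ring_nf

lemma cksCeilHalf_zero (s : Int) : cksCeilHalf s 0 = s := by
  simp [cksCeilHalf_eq]

-- one loop step sends the running size ceil(s/2^n) to ceil(s/2^(n+1))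
lemma cksCeilHalf_step (s : Int) (n : Nat) :
    cksCeilHalf s n - PySem.Int.floordiv (cksCeilHalf s n) 2 = cksCeilHalf s (n + 1) := by
  have h2 : (0:Int) ≤ 2 ^ n := by positivity
  have hsplit : (-s) / (2:Int) ^ (n + 1) = (-s) / 2 ^ n / 2 := by
    rw [pow_succ, ← Int.ediv_ediv_of_nonneg h2]
  set t : Int := (-s) / (2:Int) ^ n with ht
  rw [cksCeilHalf_eq, cksCeilHalf_eq, hsplit,
      PySem.Int.floordiv_eq_ediv_of_pos (by norm_num : (0:Int) < 2)]
  omega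

lemma cks_loop (s : Int) (n : Nat) :
    (PySem.List.pyRange 0 (n : Int) 1).foldl
      (fun (acc : List Int × Int) _ =>
        let k := PySem.Int.floordiv acc.2 2 + 1
        (acc.1 ++ [k], acc.2 - (k - 1))) ([], s)
    = ((List.range n).map (fun i => PySem.Int.floordiv (cksCeilHalf s i) 2 + 1),
       cksCeilHalf s n) := by
  induction n with
  | zero => simp [PySem.List.pyRange_one_eq_nil, cksCeilHalf_zero]
  | succ m ih =>
      have hstep : ((m : Int) + 1) = ((m + 1 : Nat) : Int) := by push_cast; ring
      rw [show ((m + 1 : Nat) : Int) = (m : Int) + 1 by push_cast; ring,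
          PySem.List.pyRange_one_succ_right (by positivity), List.foldl_append, ih]
      simp only [List.foldl_cons, List.foldl_nil, List.range_succ, List.map_append,
        List.map_cons, List.map_nil]
      simp only [Prod.mk.injEq]
      exact ⟨trivial, by have := cksCeilHalf_step s m; omega⟩

-- ===== VERDICT (by name: the statement is the Claim_ definition above) =====
theorem compute_kernel_sizes_spec : Claim_equal_compute_kernel_sizes := by
  intro s num_layers _
  unfold Spec_compute_kernel_sizes compute_kernel_sizes compute_kernel_sizes_alt
  have h : num_layers - 1 = (((num_layers - 1).toNat : Nat) : Int) ∨ num_layers - 1 < 0 := by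
    omega
  rcases h with h | h
  · rw [h, cks_loop]
    simp
  · rw [PySem.List.pyRange_one_eq_nil (by omega),
        show (num_layers - 1).toNat = 0 by omega]
    simp [cksCeilHalf_zero]
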